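-- pv_equiv track=rewrite | github.com/JD-TB1/diseaseembedding | tools/visualize_disease_tree.py | collect_subtree
-- ===== SOURCE A (Python) =====
-- def collect_subtree(
--     root_id: str,
--     children: dict[str, list[str]],
--     max_depth: int | None,
-- ) -> tuple[list[str], dict[str, int]]:
--     ordered: list[str] = []
--     depth_map: dict[str, int] = {}
--     stack: list[tuple[str, int]] = [(root_id, 0)]
--     seen: set[str] = set()
--     while stack:
--         node_id, depth = stack.pop()
--         if node_id in seen:
--             continue
--         seen.add(node_id)
--         ordered.append(node_id)
--         depth_map[node_id] = depth
--         if max_depth is not None and depth >= max_depth: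
--             continue
--         for child_id in reversed(children.get(node_id, [])):
--             stack.append((child_id, depth + 1))
--     return ordered, depth_map
-- ===== SOURCE B (Python) =====
-- def collect_subtree(
--     root_id: str,
--     children: dict[str, list[str]],
--     max_depth: int | None,
-- ) -> tuple[list[str], dict[str, int]]:
--     ordered: list[str] = []
--     depth_map: dict[str, int] = {}
--     seen: set[str] = set()
--
--     def visit(node_id: str, depth: int) -> None:
--         if node_id in seen:
--             return
--         seen.add(node_id)
--         ordered.append(node_id)
--         depth_map[node_id] = depth
--         if max_depth is not None and depth >= max_depth:
--             return
--         for child_id in children.get(node_id, []):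
--             visit(child_id, depth + 1)
--
--     visit(root_id, 0)
--     return ordered, depth_map
-- ===== Notes on version B (the rewrite author's own statement) =====
-- stated objective: simpler
-- what changed: Replaces A's explicit stack with reversed child pushes and pop-time seen checks by a nested recursive pre-order visit(node, depth) that checks seen on entry and recurses over children in their original order.
import Mathlib
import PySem

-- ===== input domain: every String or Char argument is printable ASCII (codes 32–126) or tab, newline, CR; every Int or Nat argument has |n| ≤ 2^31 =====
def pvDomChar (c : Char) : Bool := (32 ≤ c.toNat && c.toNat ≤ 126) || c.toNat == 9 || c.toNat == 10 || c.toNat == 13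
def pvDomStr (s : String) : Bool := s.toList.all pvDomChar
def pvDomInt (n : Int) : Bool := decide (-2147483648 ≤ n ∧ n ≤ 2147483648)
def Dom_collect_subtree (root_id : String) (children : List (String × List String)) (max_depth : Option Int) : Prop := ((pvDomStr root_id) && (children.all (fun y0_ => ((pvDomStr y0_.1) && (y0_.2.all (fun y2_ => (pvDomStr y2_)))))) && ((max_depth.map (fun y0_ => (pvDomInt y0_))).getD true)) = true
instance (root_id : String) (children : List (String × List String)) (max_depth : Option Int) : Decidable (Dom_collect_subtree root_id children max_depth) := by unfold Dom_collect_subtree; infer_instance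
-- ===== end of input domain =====

-- B is a recursive pre-order DFS (nested `visit`) instead of A's explicit stack with reversed
-- pushes; same return value, objective: simpler/alternative decomposition.
-- Note: Python B's recursion can hit the interpreter recursion limit on extremely deep trees;
-- on such inputs A still returns (not reflected in the Lean ports, which are total).

-- shared tiny helper: `max_depth is not None and depth >= max_depth`
def pvStop (md : Option Int) (depth : Int) : Bool :=
  match md with
  | none => false
  | some m => decide (depth ≥ m)

-- number of dict keys not yet seen (termination measure only)
def pvUnseen (ch : PySem.Dict String (List String)) (seen : PySem.Set String) : Nat :=
  ((PySem.Dict.keys ch).filter (fun x => !(PySem.Set.contains seen x))).length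

theorem pvFilterLenMono {α : Type} (p q : α → Bool) (h : ∀ x, q x = true → p x = true) :
    ∀ l : List α, (l.filter q).length ≤ (l.filter p).length := by
  intro l
  induction l with
  | nil => simp
  | cons a l ih =>
    rw [List.filter_cons, List.filter_cons]
    by_cases hq : q a = true
    · rw [if_pos hq, if_pos (h a hq)]; exact Nat.succ_le_succ ih
    · rw [if_neg hq]
      split
      · exact le_trans ih (by rw [List.length_cons]; omega)
      · exact ih

theorem pvFilterLenLt {α : Type} (p q : α → Bool) (h : ∀ x, q x = true → p x = true)
    (c : α) (hp : p c = true) (hq : q c = false) :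
    ∀ l : List α, c ∈ l → (l.filter q).length < (l.filter p).length := by
  intro l
  induction l with
  | nil => simp
  | cons a l ih =>
    intro hmem
    rw [List.filter_cons, List.filter_cons]
    rcases List.mem_cons.mp hmem with rfl | hmem
    · rw [if_pos hp, if_neg (by simp [hq])]
      have := pvFilterLenMono p q h l
      simp; omega
    · have := ih hmem
      by_cases hqa : q a = true
      · rw [if_pos hqa, if_pos (h a hqa)]; exact Nat.succ_le_succ this
      · rw [if_neg hqa]
        split
        · exact lt_of_lt_of_le this (by rw [List.length_cons]; omega)
        · exact this

theorem pvUnseen_le_of_subset (ch : PySem.Dict String (List String))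
    (s t : PySem.Set String) (h : ∀ x, x ∈ s → x ∈ t) :
    pvUnseen ch t ≤ pvUnseen ch s := by
  apply pvFilterLenMono
  intro x hx
  simp only [Bool.not_eq_true', ← Bool.not_eq_true, PySem.Set.contains_iff] at *
  exact fun hmem => hx (h x hmem)

theorem pvUnseen_add_lt (ch : PySem.Dict String (List String)) (s : PySem.Set String)
    (c : String) (hk : c ∈ PySem.Dict.keys ch) (hc : c ∉ s) :
    pvUnseen ch (PySem.Set.add s c) < pvUnseen ch s := by
  apply pvFilterLenLt (fun x => !(PySem.Set.contains s x))
      (fun x => !(PySem.Set.contains (PySem.Set.add s c) x)) _ c _ _ _ hk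
  · intro x hx
    simp only [Bool.not_eq_true', ← Bool.not_eq_true, PySem.Set.contains_iff,
      PySem.Set.mem_add] at *
    exact fun hmem => hx (Or.inl hmem)
  · simp
    exact hc
  · simp

theorem pvUnseen_add_of_not_mem_keys (ch : PySem.Dict String (List String))
    (s : PySem.Set String) (c : String) (hk : c ∉ PySem.Dict.keys ch) :
    pvUnseen ch (PySem.Set.add s c) = pvUnseen ch s := by
  unfold pvUnseen
  congr 1
  apply List.filter_congr
  intro x hx
  have hne : x ≠ c := fun h => hk (h ▸ hx)
  have : PySem.Set.contains (PySem.Set.add s c) x = PySem.Set.contains s x := by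
    rcases hcs : PySem.Set.contains s x with _ | _
    · rw [← Bool.not_eq_true, PySem.Set.contains_iff, PySem.Set.mem_add]
      rw [← Bool.not_eq_true, PySem.Set.contains_iff] at hcs
      simp [hcs, hne]
    · rw [PySem.Set.contains_iff] at hcs ⊢
      exact (PySem.Set.mem_add _ _ _).mpr (Or.inl hcs)
  rw [this]

theorem pvGetD_nil_of_not_mem_keys (ch : PySem.Dict String (List String))
    (k : String) (hk : k ∉ PySem.Dict.keys ch) :
    PySem.Dict.getD ch k [] = [] := by
  rw [PySem.Dict.getD_eq_get?_getD, (PySem.Dict.get?_eq_none_iff_not_mem_keys ch k).mpr hk]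
  rfl

-- ===== PORT A =====
-- A's while-loop over an explicit stack; the stack is kept top-first (Python pushes/pops at
-- the list's end), so `for child in reversed(...): stack.append(...)` is a fold consing the
-- reversed children.  State: (ordered, depth_map, seen).
def loopA (ch : PySem.Dict String (List String)) (md : Option Int) :
    List (String × Int) → List String → PySem.Dict String Int → PySem.Set String →
    List String × PySem.Dict String Int × PySem.Set String
  | [], ordered, dm, seen => (ordered, dm, seen)
  | (node, depth) :: rest, ordered, dm, seen =>
    if PySem.Set.contains seen node then
      loopA ch md rest ordered dm seen
    else
      let seen' := PySem.Set.add seen node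
      let ordered' := ordered ++ [node]
      let dm' := dm.insert node depth
      if pvStop md depth then
        loopA ch md rest ordered' dm' seen'
      else
        loopA ch md ((PySem.Dict.getD ch node []).reverse.foldl
          (fun st c => (c, depth + 1) :: st) rest) ordered' dm' seen'
  termination_by stack _ _ seen => (pvUnseen ch seen, stack.length)
  decreasing_by
  · exact Prod.Lex.right _ (by simp)
  · rcases Nat.lt_or_eq_of_le (pvUnseen_le_of_subset ch seen (PySem.Set.add seen node)
        (fun x hx => (PySem.Set.mem_add _ _ _).mpr (Or.inl hx))) with h | h
    · exact Prod.Lex.left _ _ h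
    · rw [h]; exact Prod.Lex.right _ (by simp)
  · by_cases hk : node ∈ PySem.Dict.keys ch
    · refine Prod.Lex.left _ _ (pvUnseen_add_lt ch seen node hk ?_)
      intro hmem
      exact absurd ((PySem.Set.contains_iff _ _).mpr hmem) (by assumption)
    · rw [pvUnseen_add_of_not_mem_keys ch seen node hk,
        pvGetD_nil_of_not_mem_keys ch node hk]
      exact Prod.Lex.right _ (by simp)

def collect_subtree (root_id : String) (children : List (String × List String)) (max_depth : Option Int) : List String × (List (String × Int)) :=
  let ch := PySem.Dict.ofList children
  let res := loopA ch max_depth [(root_id, 0)] [] PySem.Dict.empty PySem.Set.empty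
  (res.1, res.2.1.items)

-- ===== PORT B =====
-- B's nested recursive `visit(node_id, depth)`; the Nat fuel is a totality guard only
-- (pvUnseen + 1 is always enough, as the equivalence proof below shows).
def visitB (ch : PySem.Dict String (List String)) (md : Option Int) :
    Nat → String → Int → (List String × PySem.Dict String Int × PySem.Set String) →
    List String × PySem.Dict String Int × PySem.Set String
  | 0, _, _, st => st
  | fuel + 1, node, depth, (ordered, dm, seen) =>
    if PySem.Set.contains seen node then (ordered, dm, seen)
    else
      let st' := (ordered ++ [node], dm.insert node depth, PySem.Set.add seen node)
      if pvStop md depth then st'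
      else (PySem.Dict.getD ch node []).foldl
        (fun t c => visitB ch md fuel c (depth + 1) t) st'
  termination_by fuel _ _ _ => fuel

def collect_subtree_alt (root_id : String) (children : List (String × List String)) (max_depth : Option Int) : List String × (List (String × Int)) :=
  let ch := PySem.Dict.ofList children
  let res := visitB ch max_depth ((PySem.Dict.keys ch).length + 1) root_id 0
    ([], PySem.Dict.empty, PySem.Set.empty)
  (res.1, res.2.1.items)

-- ===== PRECONDITION & SPEC =====
def Spec_collect_subtree (root_id : String) (children : List (String × List String)) (max_depth : Option Int) (out : List String × (List (String × Int))) : Prop := out = collect_subtree_alt root_id children max_depth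
instance (root_id : String) (children : List (String × List String)) (max_depth : Option Int) (out : List String × (List (String × Int))) : Decidable (Spec_collect_subtree root_id children max_depth out) := by unfold Spec_collect_subtree; infer_instance

-- ===== CLAIM (what is proved, stated in full; the proofs are below) =====
def Claim_equal_collect_subtree : Prop := ∀ (root_id : String) (children : List (String × List String)) (max_depth : Option Int), Dom_collect_subtree root_id children max_depth → Spec_collect_subtree root_id children max_depth (collect_subtree root_id children max_depth)

-- ===== LEMMAS AND PROOFS =====

-- the reversed-push loop, as a list: pushing reversed(cs) puts cs in order on top of the stack
theorem pvRevPush (d : Int) : ∀ (l : List String) (acc : List (String × Int)),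
    l.foldl (fun st c => (c, d) :: st) acc = l.reverse.map (fun c => (c, d)) ++ acc := by
  intro l
  induction l with
  | nil => simp
  | cons a l ih => intro acc; simp [List.foldl, ih]


theorem pvSeenMono (ch : PySem.Dict String (List String)) (md : Option Int) :
    ∀ (fuel : Nat) (node : String) (depth : Int) st,
      st.2.2 ⊆ (visitB ch md fuel node depth st).2.2 := by
  intro fuel
  induction fuel with
  | zero => intro node depth st; simp [visitB]
  | succ fuel ih =>
    have fold : ∀ (cs : List String) (depth : Int) st,
        st.2.2 ⊆ (cs.foldl (fun t c => visitB ch md fuel c depth t) st).2.2 := by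
      intro cs
      induction cs with
      | nil => intro depth st; simp
      | cons c cs ihc =>
        intro depth st
        exact List.Subset.trans (ih c depth st) (ihc depth _)
    intro node depth ⟨ordered, dm, seen⟩
    show seen ⊆ _
    simp only [visitB]
    split
    · exact fun x h => h
    · split
      · exact fun x hx => (PySem.Set.mem_add _ _ _).mpr (Or.inl hx)
      · exact List.Subset.trans
          (fun x hx => (PySem.Set.mem_add _ _ _).mpr (Or.inl hx))
          (fold (PySem.Dict.getD ch node []) (depth + 1)
            (ordered ++ [node], dm.insert node depth, PySem.Set.add seen node))

theorem pvSeenMonoFold (ch : PySem.Dict String (List String)) (md : Option Int)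
    (fuel : Nat) : ∀ (cs : List String) (depth : Int) st,
      st.2.2 ⊆ (cs.foldl (fun t c => visitB ch md fuel c depth t) st).2.2 := by
  intro cs
  induction cs with
  | nil => intro depth st; simp
  | cons c cs ihc =>
    intro depth st
    exact List.Subset.trans (pvSeenMono ch md fuel c depth st) (ihc depth _)

theorem loopA_nil (ch : PySem.Dict String (List String)) (md : Option Int)
    (ordered : List String) (dm : PySem.Dict String Int) (seen : PySem.Set String) :
    loopA ch md [] ordered dm seen = (ordered, dm, seen) := by
  simp [loopA]

theorem loopA_cons (ch : PySem.Dict String (List String)) (md : Option Int)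
    (node : String) (depth : Int) (rest : List (String × Int))
    (ordered : List String) (dm : PySem.Dict String Int) (seen : PySem.Set String) :
    loopA ch md ((node, depth) :: rest) ordered dm seen =
      if PySem.Set.contains seen node then
        loopA ch md rest ordered dm seen
      else if pvStop md depth then
        loopA ch md rest (ordered ++ [node]) (dm.insert node depth) (PySem.Set.add seen node)
      else
        loopA ch md ((PySem.Dict.getD ch node []).reverse.foldl
            (fun st c => (c, depth + 1) :: st) rest)
          (ordered ++ [node]) (dm.insert node depth) (PySem.Set.add seen node) := by
  rw [loopA]

-- main correspondence: running A's loop with cs (at depth d) on top of the stack equals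
-- first visiting each of cs recursively (with enough fuel), then continuing with the rest
theorem pvMain (ch : PySem.Dict String (List String)) (md : Option Int) :
    ∀ (fuel : Nat) (cs : List String) (d : Int) (rest : List (String × Int))
      (ordered : List String) (dm : PySem.Dict String Int) (seen : PySem.Set String),
      pvUnseen ch seen + 1 ≤ fuel →
      loopA ch md (cs.map (fun c => (c, d)) ++ rest) ordered dm seen =
        (fun t => loopA ch md rest t.1 t.2.1 t.2.2)
          (cs.foldl (fun t c => visitB ch md fuel c d t) (ordered, dm, seen)) := by
  intro fuel
  induction fuel with
  | zero => intro cs d rest ordered dm seen h; omega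
  | succ fuel ih =>
    intro cs
    induction cs with
    | nil => intro d rest ordered dm seen h; simp
    | cons c cs ihc =>
      intro d rest ordered dm seen h
      simp only [List.map, List.cons_append, List.foldl]
      rw [loopA_cons]
      by_cases hc : PySem.Set.contains seen c = true
      · rw [if_pos hc]
        rw [show visitB ch md (fuel + 1) c d (ordered, dm, seen) = (ordered, dm, seen) by
          simp only [visitB]; rw [if_pos hc]]
        exact ihc d rest ordered dm seen h
      · rw [if_neg hc]
        have hmono : ∀ x, x ∈ seen → x ∈ PySem.Set.add seen c :=
          fun x hx => (PySem.Set.mem_add _ _ _).mpr (Or.inl hx)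
        have hle : pvUnseen ch (PySem.Set.add seen c) ≤ pvUnseen ch seen :=
          pvUnseen_le_of_subset ch seen _ hmono
        by_cases hstop : pvStop md d = true
        · rw [if_pos hstop]
          rw [show visitB ch md (fuel + 1) c d (ordered, dm, seen) =
              (ordered ++ [c], dm.insert c d, PySem.Set.add seen c) by
            simp only [visitB]; rw [if_neg hc, if_pos hstop]]
          exact ihc d rest _ _ _ (by omega)
        · rw [if_neg hstop]
          rw [show visitB ch md (fuel + 1) c d (ordered, dm, seen) =
              (PySem.Dict.getD ch c []).foldl
                (fun t c' => visitB ch md fuel c' (d + 1) t)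
                (ordered ++ [c], dm.insert c d, PySem.Set.add seen c) by
            simp only [visitB]; rw [if_neg hc, if_neg hstop]]
          rw [pvRevPush, List.reverse_reverse]
          by_cases hk : c ∈ PySem.Dict.keys ch
          · have hlt : pvUnseen ch (PySem.Set.add seen c) < pvUnseen ch seen :=
              pvUnseen_add_lt ch seen c hk
              (fun hmem => hc ((PySem.Set.contains_iff _ _).mpr hmem))
            rw [ih (PySem.Dict.getD ch c []) (d + 1) (cs.map (fun c => (c, d)) ++ rest)
              _ _ _ (by omega)]
            have hle2 : pvUnseen ch ((PySem.Dict.getD ch c []).foldl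
                (fun t c' => visitB ch md fuel c' (d + 1) t)
                (ordered ++ [c], dm.insert c d, PySem.Set.add seen c)).2.2 ≤
                pvUnseen ch (PySem.Set.add seen c) :=
              pvUnseen_le_of_subset ch _ _ (fun x hx =>
                pvSeenMonoFold ch md fuel _ (d + 1) _ hx)
            set t := (PySem.Dict.getD ch c []).foldl
                (fun t c' => visitB ch md fuel c' (d + 1) t)
                (ordered ++ [c], dm.insert c d, PySem.Set.add seen c) with ht
            exact ihc d rest t.1 t.2.1 t.2.2 (by omega)
          · rw [pvGetD_nil_of_not_mem_keys ch c hk]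
            simp only [List.foldl_nil, List.map_nil, List.nil_append]
            exact ihc d rest _ _ _ (by omega)

-- ===== VERDICT (by name: the statement is the Claim_ definition above) =====
theorem collect_subtree_spec : Claim_equal_collect_subtree := by
  intro root_id children max_depth _
  unfold Spec_collect_subtree collect_subtree collect_subtree_alt
  have h := pvMain (PySem.Dict.ofList children) max_depth
    ((PySem.Dict.keys (PySem.Dict.ofList children)).length + 1) [root_id] 0 [] []
    PySem.Dict.empty PySem.Set.empty
    (by
      have : pvUnseen (PySem.Dict.ofList children) PySem.Set.empty ≤
          (PySem.Dict.keys (PySem.Dict.ofList children)).length :=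
        List.length_filter_le _ _
      omega)
  simp only [List.map, List.foldl, List.append_nil] at h
  rw [loopA_nil] at h
  show (_, (loopA (PySem.Dict.ofList children) max_depth [(root_id, 0)] [] PySem.Dict.empty
      PySem.Set.empty).2.1.items) = _
  rw [h]
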